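-- pv_equiv track=rewrite | github.com/baner3221/AutoDocGen | src/autodocgen/chunker/intelligent_chunker.py | _get_function_prefix
-- ===== SOURCE A (Python) =====
-- def _get_function_prefix(name: str) -> str:
--     """Extract a grouping prefix from a function name."""
--     # Common prefixes in Android/kernel code
--     prefixes = [
--         "on", "handle", "do", "process", "init", "destroy",
--         "create", "get", "set", "is", "has", "can", "should",
--         "update", "notify", "dispatch", "validate", "parse",
--     ]
--
--     name_lower = name.lower()
--     for prefix in prefixes:
--         if name_lower.startswith(prefix) and len(name) > len(prefix):
--             # Check if it's a camelCase or snake_case boundary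
--             next_char = name[len(prefix)]
--             if next_char.isupper() or next_char == "_":
--                 return prefix
--
--     # Try to split on underscore
--     if "_" in name:
--         return name.split("_")[0]
--
--     return ""
-- ===== SOURCE B (Python) =====
-- PREFIXES = frozenset(
--     "on handle do process init destroy create get set is has can should "
--     "update notify dispatch validate parse".split()
-- )
--
--
-- def _get_function_prefix(name: str) -> str:
--     """Extract a grouping prefix from a function name."""
--     # Single pass over the name: grow the lowered head one character at a
--     # time; at each camelCase/snake_case boundary return the head if it is
--     # a known prefix (at most one head can ever match: the prefix set is
--     # prefix-free). Fall back to the part before the first underscore.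
--     head = ""
--     for c in name:
--         if (c.isupper() or c == "_") and head in PREFIXES:
--             return head
--         head += c.lower()
--     before, sep, _ = name.partition("_")
--     return before if sep else ""
-- ===== Notes on version B (the rewrite author's own statement) =====
-- stated objective: alternative
-- what changed: B replaces A's trial of each of the 18 known prefixes (startswith + boundary check per prefix) by a single left-to-right pass that grows the lowered head one character at a time and tests it against a frozenset at each camelCase/underscore boundary, falling back via str.partition; this is correct because the prefix set is prefix-free, so at most one boundary position can ever match.
import Mathlib
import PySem

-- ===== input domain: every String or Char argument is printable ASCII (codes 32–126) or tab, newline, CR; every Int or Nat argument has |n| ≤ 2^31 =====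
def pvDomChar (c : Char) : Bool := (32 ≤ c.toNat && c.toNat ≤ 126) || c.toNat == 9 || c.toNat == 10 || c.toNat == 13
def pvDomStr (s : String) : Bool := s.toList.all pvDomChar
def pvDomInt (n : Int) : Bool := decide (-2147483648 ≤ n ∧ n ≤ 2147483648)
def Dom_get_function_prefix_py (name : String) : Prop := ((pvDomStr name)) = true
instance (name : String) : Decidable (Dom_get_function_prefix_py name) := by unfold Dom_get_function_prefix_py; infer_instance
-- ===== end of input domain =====

-- B makes a single pass over the name, growing the lowered head character by character and
-- testing it against a prefix set at each camelCase/underscore boundary, instead of A's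
-- trial of each of the 18 prefixes in turn (objective: alternative).

-- ===== PORT A =====
def aPrefixes : List (List Char) :=
  [['o','n'], ['h','a','n','d','l','e'], ['d','o'], ['p','r','o','c','e','s','s'],
   ['i','n','i','t'], ['d','e','s','t','r','o','y'], ['c','r','e','a','t','e'],
   ['g','e','t'], ['s','e','t'], ['i','s'], ['h','a','s'], ['c','a','n'],
   ['s','h','o','u','l','d'], ['u','p','d','a','t','e'], ['n','o','t','i','f','y'],
   ['d','i','s','p','a','t','c','h'], ['v','a','l','i','d','a','t','e'],
   ['p','a','r','s','e']]

-- the loop-body test: name_lower.startswith(prefix) and len(name) > len(prefix)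
-- and name[len(prefix)].isupper() or == '_'
def aCheck (ns nl p : List Char) : Bool :=
  PySem.Chars.startswith nl p && decide (p.length < ns.length) &&
    ((PySem.List.pyGet? ns (p.length : Int)).elim false fun c =>
      PySem.Chars.isupper c || c == '_')

def get_function_prefix_py (name : String) : String :=
  let ns := name.toList
  let nl := PySem.Chars.lower ns
  match aPrefixes.find? (aCheck ns nl) with
  | some p => String.ofList p
  | none =>
    if PySem.Chars.isIn ['_'] ns then
      String.ofList ((PySem.Chars.splitOn ns ['_']).headD [])
    else ""

-- ===== PORT B =====
-- PREFIXES = frozenset("on handle do … parse".split())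
def bPrefixSet : PySem.Set (List Char) :=
  PySem.Set.ofList (PySem.Chars.split₀
    ("on handle do process init destroy create get set is has can should update notify dispatch validate parse".toList))

-- the for-loop: head grows by one lowered character per step; at a boundary,
-- return the head if it is a known prefix
def bWalk : List Char → List Char → Option (List Char)
  | _, [] => none
  | head, c :: rest =>
    if (PySem.Chars.isupper c || c == '_') && bPrefixSet.contains head then some head
    else bWalk (head ++ [PySem.Chars.lowerChar c]) rest

-- name.partition("_") restricted to what B uses: (part before the first '_', sep truthiness)
def bPartU : List Char → List Char × Bool
  | [] => ([], false)
  | c :: rest =>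
    if c == '_' then ([], true)
    else
      let p := bPartU rest
      (c :: p.1, p.2)

def get_function_prefix_py_alt (name : String) : String :=
  match bWalk [] name.toList with
  | some h => String.ofList h
  | none =>
    let p := bPartU name.toList
    if p.2 then String.ofList p.1 else ""

-- ===== PRECONDITION & SPEC =====
def Spec_get_function_prefix_py (name : String) (out : String) : Prop := out = get_function_prefix_py_alt name
instance (name : String) (out : String) : Decidable (Spec_get_function_prefix_py name out) := by unfold Spec_get_function_prefix_py; infer_instance

-- ===== CLAIM (what is proved, stated in full; the proofs are below) =====
def Claim_equal_get_function_prefix_py : Prop := ∀ (name : String), Dom_get_function_prefix_py name → Spec_get_function_prefix_py name (get_function_prefix_py name)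

-- ===== LEMMAS AND PROOFS =====

-- B's walk can succeed at position j with value h
def Hit (ns : List Char) (j : Nat) (h : List Char) : Prop :=
  ∃ c, ns[j]? = some c ∧ (PySem.Chars.isupper c || c == '_') = true ∧
    h = PySem.Chars.lower (ns.take j) ∧ bPrefixSet.contains h = true

set_option maxRecDepth 8192 in
lemma bPrefixSet_eq : bPrefixSet = PySem.Set.ofList aPrefixes := by
  unfold bPrefixSet; rfl

lemma bContains_iff (h : List Char) :
    bPrefixSet.contains h = true ↔ h ∈ aPrefixes := by
  rw [bPrefixSet_eq, PySem.Set.contains_iff]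
  simp [PySem.Set.mem_ofList]

lemma aPrefixes_prefixFree :
    ∀ p ∈ aPrefixes, ∀ q ∈ aPrefixes, p <+: q → p = q := by decide

lemma lower_append (a b : List Char) :
    PySem.Chars.lower (a ++ b) = PySem.Chars.lower a ++ PySem.Chars.lower b := by
  simp [PySem.Chars.lower]

lemma lower_take (ns : List Char) (k : Nat) :
    PySem.Chars.lower (ns.take k) = (PySem.Chars.lower ns).take k := by
  simp [PySem.Chars.lower, List.map_take]

lemma lower_length (ns : List Char) : (PySem.Chars.lower ns).length = ns.length :=
  List.length_map ..

-- any two hit values coincide (the prefix list is prefix-free)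
lemma take_eq_take_of_mem {ns p q : List Char}
    (hp : p ∈ aPrefixes) (hq : q ∈ aPrefixes)
    (hpt : p = (PySem.Chars.lower ns).take p.length)
    (hqt : q = (PySem.Chars.lower ns).take q.length) : p = q := by
  have h1 : p <+: PySem.Chars.lower ns := hpt ▸ List.take_prefix _ _
  have h2 : q <+: PySem.Chars.lower ns := hqt ▸ List.take_prefix _ _
  rcases List.prefix_or_prefix_of_prefix h1 h2 with h | h
  · exact aPrefixes_prefixFree p hp q hq h
  · exact (aPrefixes_prefixFree q hq p hp h).symm

lemma hit_shape {ns : List Char} {j : Nat} {h : List Char} (hh : Hit ns j h) :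
    h ∈ aPrefixes ∧ j < ns.length ∧ h = (PySem.Chars.lower ns).take j ∧ h.length = j := by
  obtain ⟨c, hc, _, ht, hcont⟩ := hh
  have hj : j < ns.length := by
    by_contra hge
    rw [List.getElem?_eq_none (by omega)] at hc
    cases hc
  have ht' : h = (PySem.Chars.lower ns).take j := by rw [ht, lower_take]
  refine ⟨(bContains_iff h).mp hcont, hj, ht', ?_⟩
  rw [ht', List.length_take, lower_length]; omega

lemma bWalk_some : ∀ (rest pre h : List Char),
    bWalk (PySem.Chars.lower pre) rest = some h → ∃ j, Hit (pre ++ rest) j h := by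
  intro rest
  induction rest with
  | nil => intro pre h hw; cases hw
  | cons c t ih =>
    intro pre h hw
    simp only [bWalk] at hw
    by_cases hcond : ((PySem.Chars.isupper c || c == '_') &&
        bPrefixSet.contains (PySem.Chars.lower pre)) = true
    · rw [if_pos hcond] at hw
      obtain rfl := Option.some.inj hw
      obtain ⟨hb, hcont⟩ := Bool.and_eq_true_iff.mp hcond
      refine ⟨pre.length, c, ?_, hb, ?_, hcont⟩
      · rw [List.getElem?_append_right (le_refl _)]; simp
      · rw [List.take_left]
    · rw [if_neg hcond] at hw
      have : PySem.Chars.lower pre ++ [PySem.Chars.lowerChar c]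
          = PySem.Chars.lower (pre ++ [c]) := by
        rw [lower_append]; rfl
      rw [this] at hw
      obtain ⟨j, hj⟩ := ih (pre ++ [c]) h hw
      exact ⟨j, by simpa using hj⟩

lemma bWalk_eq_some : ∀ (rest pre h : List Char) (j : Nat),
    pre.length ≤ j → Hit (pre ++ rest) j h →
    (∀ j' h', Hit (pre ++ rest) j' h' → h' = h) →
    bWalk (PySem.Chars.lower pre) rest = some h := by
  intro rest
  induction rest with
  | nil =>
    intro pre h j hle hhit _
    obtain ⟨_, hj, _, _⟩ := hit_shape hhit
    simp at hj; omega
  | cons c t ih =>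
    intro pre h j hle hhit huniq
    have hcget : (pre ++ c :: t)[pre.length]? = some c := by
      rw [List.getElem?_append_right (le_refl _)]; simp
    simp only [bWalk]
    by_cases hcond : ((PySem.Chars.isupper c || c == '_') &&
        bPrefixSet.contains (PySem.Chars.lower pre)) = true
    · rw [if_pos hcond]
      obtain ⟨hb, hcont⟩ := Bool.and_eq_true_iff.mp hcond
      have : PySem.Chars.lower pre = h := by
        refine huniq pre.length (PySem.Chars.lower pre) ⟨c, hcget, hb, ?_, hcont⟩
        rw [List.take_left]
      rw [this]
    · rw [if_neg hcond]
      have hne : j ≠ pre.length := by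
        intro rfl_eq
        obtain ⟨c', hc', hb', ht', hcont'⟩ := hhit
        rw [rfl_eq, hcget] at hc'
        obtain rfl := Option.some.inj hc'
        rw [rfl_eq, List.take_left] at ht'
        rw [ht'] at hcont'
        exact hcond (Bool.and_eq_true_iff.mpr ⟨hb', hcont'⟩)
      have : PySem.Chars.lower pre ++ [PySem.Chars.lowerChar c]
          = PySem.Chars.lower (pre ++ [c]) := by
        rw [lower_append]; rfl
      rw [this]
      refine ih (pre ++ [c]) h j (by simp; omega) (by simpa using hhit) ?_
      intro j' h' hh'
      exact huniq j' h' (by simpa using hh')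

-- a successful aCheck and a Hit describe the same situation
lemma aCheck_elim {ns p : List Char}
    (hp : aCheck ns (PySem.Chars.lower ns) p = true) :
    p = (PySem.Chars.lower ns).take p.length ∧ p.length < ns.length ∧
      ∃ c, PySem.List.pyGet? ns (p.length : Int) = some c ∧
        (PySem.Chars.isupper c || c == '_') = true := by
  simp only [aCheck, Bool.and_eq_true, decide_eq_true_eq] at hp
  obtain ⟨⟨hsw, hlen⟩, hbnd⟩ := hp
  have hpre : p <+: PySem.Chars.lower ns := (PySem.Chars.startswith_iff _ _).mp hsw
  refine ⟨List.prefix_iff_eq_take.mp hpre, hlen, ?_⟩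
  rcases hc : PySem.List.pyGet? ns (p.length : Int) with _ | c
  · rw [hc] at hbnd; simp [Option.elim] at hbnd
  · rw [hc] at hbnd; exact ⟨c, rfl, hbnd⟩

-- the central fact: A's prefix search and B's single walk return the same option
lemma scan_eq (ns : List Char) :
    aPrefixes.find? (aCheck ns (PySem.Chars.lower ns)) = bWalk [] ns := by
  have hnil : bWalk [] ns = bWalk (PySem.Chars.lower []) ns := rfl
  rcases hA : aPrefixes.find? (aCheck ns (PySem.Chars.lower ns)) with _ | p
  · rcases hB : bWalk [] ns with _ | h
    · rfl
    · exfalso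
      rw [hnil] at hB
      obtain ⟨j, hhit⟩ := bWalk_some ns [] h (by simpa using hB)
      obtain ⟨hmem, hj, ht, hlen⟩ := hit_shape (by simpa using hhit)
      obtain ⟨c, hc, hb, _, _⟩ := (by simpa using hhit : Hit ns j h)
      have hcheck : aCheck ns (PySem.Chars.lower ns) h = true := by
        simp only [aCheck, Bool.and_eq_true, decide_eq_true_eq]
        refine ⟨⟨?_, by omega⟩, ?_⟩
        · refine (PySem.Chars.startswith_iff _ _).mpr ?_
          rw [ht]; exact List.take_prefix _ _
        · rw [hlen, PySem.List.pyGet?_natCast, hc]; exact hb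
      exact absurd (List.find?_eq_none.mp hA h hmem) (by simp [hcheck])
  · have hmem : p ∈ aPrefixes := List.mem_of_find?_eq_some hA
    have hp : aCheck ns (PySem.Chars.lower ns) p = true := List.find?_some hA
    obtain ⟨htake, hlenlt, c, hc, hb⟩ := aCheck_elim hp
    rw [PySem.List.pyGet?_natCast] at hc
    have hhit : Hit ns p.length p := by
      refine ⟨c, hc, hb, ?_, (bContains_iff p).mpr hmem⟩
      rw [lower_take]; exact htake
    rw [hnil]
    refine (bWalk_eq_some ns [] p p.length (by simp) (by simpa using hhit) ?_).symm
    intro j' h' hh'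
    obtain ⟨hmem', _, ht', hlen'⟩ := hit_shape (by simpa using hh' : Hit ns j' h')
    exact take_eq_take_of_mem hmem' hmem (by rw [hlen']; exact ht') htake

-- the fallbacks agree: split("_")[0] is the part before the first underscore,
-- and "_" in name is exactly bPartU's flag
lemma go_acc (sep : List Char) : ∀ (fuel : Nat) (l cur : List Char) (acc : List (List Char)),
    PySem.Chars.splitOn.go sep fuel l cur acc
      = acc.reverse ++ PySem.Chars.splitOn.go sep fuel l cur [] := by
  intro fuel
  induction fuel with
  | zero => intro l cur acc; simp [PySem.Chars.splitOn.go]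
  | succ n ih =>
    intro l cur acc
    cases l with
    | nil => simp [PySem.Chars.splitOn.go]
    | cons c rest =>
      simp only [PySem.Chars.splitOn.go]
      split
      · rw [ih _ _ (cur.reverse :: acc), ih _ _ (cur.reverse :: [])]
        simp
      · rw [ih _ (c :: cur) acc]

lemma go_head : ∀ (fuel : Nat) (l cur : List Char), l.length < fuel →
    (PySem.Chars.splitOn.go ['_'] fuel l cur []).headD []
      = cur.reverse ++ l.takeWhile (fun c => c != '_') := by
  intro fuel
  induction fuel with
  | zero => intro l cur h; omega
  | succ n ih =>
    intro l cur h
    cases l with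
    | nil => simp [PySem.Chars.splitOn.go]
    | cons c rest =>
      simp only [PySem.Chars.splitOn.go]
      split
      · rename_i hp
        have hc : c = '_' := by
          have := hp; simp [List.isPrefixOf] at this; exact this.symm
        rw [go_acc]
        simp [hc, List.takeWhile]
      · rename_i hp
        have hc : (c != '_') = true := by
          have := hp; simp [List.isPrefixOf] at this
          simpa using fun e => this e.symm
        rw [ih rest (c :: cur) (by simpa using Nat.lt_of_succ_lt_succ h)]
        simp [List.takeWhile, hc]

lemma splitOn_headD (ns : List Char) :
    (PySem.Chars.splitOn ns ['_']).headD [] = ns.takeWhile (fun c => c != '_') := by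
  rw [PySem.Chars.splitOn]
  simpa using go_head (ns.length + 1) ns [] (by omega)

lemma bPartU_fst (ns : List Char) : (bPartU ns).1 = ns.takeWhile (fun c => c != '_') := by
  induction ns with
  | nil => rfl
  | cons c rest ih =>
    by_cases hc : c = '_'
    · simp [bPartU, hc]
    · simp [bPartU, hc, ih]

lemma bPartU_snd (ns : List Char) : (bPartU ns).2 = PySem.Chars.isIn ['_'] ns := by
  have h1 : (bPartU ns).2 = true ↔ '_' ∈ ns := by
    induction ns with
    | nil => simp [bPartU]
    | cons c rest ih =>
      by_cases hc : c = '_'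
      · simp [bPartU, hc]
      · have he : (bPartU (c :: rest)).2 = (bPartU rest).2 := by
          simp [bPartU, hc]
        rw [he, ih, List.mem_cons]
        constructor
        · exact Or.inr
        · rintro (h | h)
          · exact absurd h.symm hc
          · exact h
  have h2 : PySem.Chars.isIn ['_'] ns = true ↔ '_' ∈ ns := by
    rw [PySem.Chars.isIn_iff_infix, List.singleton_infix_iff]
  rw [Bool.eq_iff_iff, h1, h2]

-- ===== VERDICT (by name: the statement is the Claim_ definition above) =====
theorem get_function_prefix_py_spec : Claim_equal_get_function_prefix_py := by
  intro name _
  show get_function_prefix_py name = get_function_prefix_py_alt name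
  simp only [get_function_prefix_py, get_function_prefix_py_alt]
  rw [← scan_eq name.toList]
  rcases aPrefixes.find? (aCheck name.toList (PySem.Chars.lower name.toList)) with _ | p
  · simp only [splitOn_headD, bPartU_fst, bPartU_snd]
  · rfl
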